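-- pv_equiv track=rewrite | github.com/krzysztof-turowski/programming-contests | facebook-hacker-cup/2021-round-2/valet_parking_chapter_1.py | push_up
-- ===== SOURCE A (Python) =====
-- def push_up(B, R, C, K):
--     down = [[int(B[i][j] == 'X') for j in range(C)] for i in range(R)]
--     for i in range(1, R):
--         for j in range(C):
--             down[i][j] += down[i - 1][j]
--     return min(
--         i + 1 - K + sum(B[i][j] == 'X' or down[i][j] >= K for j in range(C))
--         for i in range(K - 1, R))
-- ===== SOURCE B (Python) =====
-- def push_up(B, R, C, K):
--     # Per-column threshold: first row index at which the column's cumulative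
--     # 'X' count reaches K (R if it never does).
--     def col_threshold(j):
--         cnt = 0
--         for i in range(R):
--             if B[i][j] == 'X':
--                 cnt += 1
--                 if cnt == K:
--                     return i
--         return R
--
--     t = [col_threshold(j) for j in range(C)]
--     # Histogram of thresholds; a lazily advanced prefix sum gives, for each
--     # candidate row i, the number of columns already full at row i.
--     hist = [0] * (R + 1)
--     for tj in t:
--         hist[tj] += 1
--     base = 0
--     nxt = 0
--     best = None
--     for i in range(K - 1, R):
--         while nxt <= i:
--             base += hist[nxt]
--             nxt += 1
--         extra = sum(1 for j in range(C) if B[i][j] == 'X' and t[j] > i)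
--         cost = i + 1 - K + base + extra
--         if best is None or cost < best:
--             best = cost
--     return best
-- ===== Notes on version B (the rewrite author's own statement) =====
-- stated objective: alternative
-- what changed: Replaces the full 2D column-prefix-sum matrix with a per-column threshold table (first row where the column's X-count reaches K, computed column-major with early exit), a threshold histogram whose lazily advanced prefix sum gives the number of full columns per candidate row, and a single running-minimum pass over the candidate rows.
-- outside the precondition, e.g. on push_up(['X', '.'], 1, 1, 0): A returns 1, B returns 0
import Mathlib
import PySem

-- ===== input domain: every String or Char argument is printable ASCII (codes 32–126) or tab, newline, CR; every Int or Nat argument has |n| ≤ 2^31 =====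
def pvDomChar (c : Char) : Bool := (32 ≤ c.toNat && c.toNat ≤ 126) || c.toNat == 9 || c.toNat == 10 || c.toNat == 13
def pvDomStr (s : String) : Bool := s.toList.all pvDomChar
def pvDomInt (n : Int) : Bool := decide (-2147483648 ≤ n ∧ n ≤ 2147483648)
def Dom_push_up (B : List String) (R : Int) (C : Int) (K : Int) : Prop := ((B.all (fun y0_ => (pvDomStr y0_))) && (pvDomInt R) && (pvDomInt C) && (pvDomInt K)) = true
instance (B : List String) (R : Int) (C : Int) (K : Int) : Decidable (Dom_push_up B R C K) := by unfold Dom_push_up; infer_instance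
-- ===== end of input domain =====

-- B replaces A's full 2D column-prefix-sum matrix by a per-column threshold table,
-- a threshold histogram with a running prefix sum, and a single running-minimum pass
-- (alternative decomposition, same asymptotic cost).

-- ===== PORT A =====
-- B[i][j] == 'X'  (false where Python would raise; Pre_ keeps all used indices in range)
def pvCell (B : List String) (i j : Int) : Bool :=
  match PySem.List.pyGet? B i with
  | some s => PySem.Str.pyGet? s j == some 'X'
  | none => false

-- down[i][j] (0 where Python would raise; Pre_ keeps all used indices in range)
def pvDget (d : List (List Int)) (i j : Int) : Int :=
  PySem.List.pyGetD (PySem.List.pyGetD d i []) j 0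

-- down = [[int(B[i][j] == 'X') for j in range(C)] for i in range(R)]
def pvDown0 (B : List String) (R C : Int) : List (List Int) :=
  (PySem.List.pyRange 0 R 1).map (fun i =>
    (PySem.List.pyRange 0 C 1).map (fun j => if pvCell B i j then (1 : Int) else 0))

-- the body of 'for i in range(1, R)': 'for j in range(C): down[i][j] += down[i-1][j]'
def pvInnerStep (C : Int) (d : List (List Int)) (i : Int) : List (List Int) :=
  (PySem.List.pyRange 0 C 1).foldl (fun d j =>
    PySem.List.pySetD d i
      (PySem.List.pySetD (PySem.List.pyGetD d i []) j (pvDget d i j + pvDget d (i - 1) j))) d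

def pvDown (B : List String) (R C : Int) : List (List Int) :=
  (PySem.List.pyRange 1 R 1).foldl (pvInnerStep C) (pvDown0 B R C)

-- min(...) over the generator; 0 where Python raises ValueError on an empty range (excluded by Pre_)
def push_up (B : List String) (R : Int) (C : Int) (K : Int) : Int :=
  (PySem.List.min?
    ((PySem.List.pyRange (K - 1) R 1).map (fun i =>
      i + 1 - K +
        ((PySem.List.pyRange 0 C 1).map (fun j =>
          if pvCell B i j || decide (K ≤ pvDget (pvDown B R C) i j) then (1 : Int) else 0)).sum))
    (fun x => x)).getD 0

-- ===== PORT B =====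
-- col_threshold(j): walk the column downwards, count 'X's, return the row where the count hits K, else R
def pvColGo (B : List String) (R K j : Int) : List Int → Int → Int
  | [], _ => R
  | i :: rest, cnt =>
    if pvCell B i j then
      (if cnt + 1 = K then i else pvColGo B R K j rest (cnt + 1))
    else pvColGo B R K j rest cnt

-- t = [col_threshold(j) for j in range(C)]
def pvThresh (B : List String) (R C K : Int) : List Int :=
  (PySem.List.pyRange 0 C 1).map (fun j => pvColGo B R K j (PySem.List.pyRange 0 R 1) 0)

-- hist = [0]*(R+1); for tj in t: hist[tj] += 1
def pvHist (R : Int) (t : List Int) : List Int :=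
  t.foldl (fun h tj => PySem.List.pySetD h tj (PySem.List.pyGetD h tj 0 + 1))
    (List.replicate (R + 1).toNat 0)

-- while nxt <= i: base += hist[nxt]; nxt += 1   (lazily advanced prefix sum)
def pvWhile (hist : List Int) (i : Int) (base nxt : Int) : Int × Int :=
  if nxt ≤ i then pvWhile hist i (base + PySem.List.pyGetD hist nxt 0) (nxt + 1)
  else (base, nxt)
termination_by (i + 1 - nxt).toNat
decreasing_by omega

-- the loop body of the single pass: advance the prefix, price row i, update the minimum
def pvStepB (B : List String) (R C K : Int) (s : Int × Int × Option Int) (i : Int) :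
    Int × Int × Option Int :=
  let bn := pvWhile (pvHist R (pvThresh B R C K)) i s.1 s.2.1
  let extra : Int :=
    ((PySem.List.pyRange 0 C 1).map (fun j =>
      if pvCell B i j && decide (i < PySem.List.pyGetD (pvThresh B R C K) j 0)
      then (1 : Int) else 0)).sum
  let cost := i + 1 - K + bn.1 + extra
  (bn.1, bn.2, match s.2.2 with
               | none => some cost
               | some b => if cost < b then some cost else some b)

-- the single pass over candidate rows: base lazily advanced, running minimum best
def push_up_alt (B : List String) (R : Int) (C : Int) (K : Int) : Int :=
  let res : Int × Int × Option Int :=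
    (PySem.List.pyRange (K - 1) R 1).foldl (pvStepB B R C K)
      ((0 : Int), (0 : Int), (none : Option Int))
  res.2.2.getD 0

-- ===== PRECONDITION & SPEC =====
-- Pre_ excludes K > R (A raises ValueError: empty min), grids with 0 < C missing one of the
-- first R rows of length >= C (A raises IndexError), and K <= 0 with 0 < C, where A's min
-- ranges over negative row indices and Python's negative-index wraparound reads rows outside
-- the grid (for C <= 0 no cell is ever read and both return normally, so those stay inside).
def Pre_push_up (B : List String) (R : Int) (C : Int) (K : Int) : Prop :=
  K ≤ R ∧ (C ≤ 0 ∨ (1 ≤ K ∧ R ≤ (B.length : Int) ∧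
    ∀ s ∈ B.take R.toNat, C ≤ (s.toList.length : Int)))
instance (B : List String) (R : Int) (C : Int) (K : Int) : Decidable (Pre_push_up B R C K) := by
  unfold Pre_push_up; infer_instance
def pvWitness_push_up : List String × Int × Int × Int := (["X.", ".X", "XX"], 3, 2, 2)
def Spec_push_up (B : List String) (R : Int) (C : Int) (K : Int) (out : Int) : Prop := out = push_up_alt B R C K
instance (B : List String) (R : Int) (C : Int) (K : Int) (out : Int) : Decidable (Spec_push_up B R C K out) := by unfold Spec_push_up; infer_instance

-- ===== CLAIM (what is proved, stated in full; the proofs are below) =====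
def Claim_equal_push_up : Prop := ∀ (B : List String) (R : Int) (C : Int) (K : Int), Dom_push_up B R C K → Pre_push_up B R C K → Spec_push_up B R C K (push_up B R C K)

-- ===== LEMMAS AND PROOFS =====

-- row i, column j holds an 'X'  (rows as Nat, columns as Int)
def pvX (B : List String) (i : Nat) (j : Int) : Bool := pvCell B (i : Int) j

-- number of 'X's in column j among the first m rows
def pvN (B : List String) (j : Int) (m : Nat) : Nat :=
  (List.range m).countP (fun i => pvX B i j)

-- total Nat-index accessor for the 2D table
def pvG (d : List (List Int)) (i j : Nat) : Int := (d.getD i []).getD j 0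

theorem pvDget_natCast (d : List (List Int)) (i j : Nat) :
    pvDget d (i : Int) (j : Int) = pvG d i j := by
  simp [pvDget, pvG, PySem.List.pyGetD_natCast]

theorem pvG_set (d : List (List Int)) (row : List Int) (i i' j : Nat) :
    pvG (d.set i row) i' j = if i' = i ∧ i < d.length then row.getD j 0 else pvG d i' j := by
  unfold pvG
  by_cases h : i' = i ∧ i < d.length
  · obtain ⟨rfl, h2⟩ := h
    simp [List.getD_eq_getElem?_getD, h2]
  · rcases eq_or_ne i' i with rfl|hne
    · simp at h
      simp [List.getD_eq_getElem?_getD, h]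
    · simp [List.getD_eq_getElem?_getD, hne.symm, if_neg h]

-- shape of the table: R rows of C columns
def pvShape (d : List (List Int)) (R C : Int) : Prop :=
  d.length = R.toNat ∧ ∀ i < R.toNat, (d.getD i []).length = C.toNat

theorem down0_row (B : List String) (R C : Int) (i : Nat) (hi : i < R.toNat) :
    (pvDown0 B R C).getD i [] =
      (PySem.List.pyRange 0 C 1).map (fun j => if pvCell B (i : Int) j then (1 : Int) else 0) := by
  unfold pvDown0
  rw [PySem.List.pyRange_zero R, List.map_map, List.getD_eq_getElem?_getD]
  simp [List.getElem?_range, hi]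

theorem down0_shape (B : List String) (R C : Int) : pvShape (pvDown0 B R C) R C := by
  refine ⟨by simp [pvDown0, PySem.List.length_pyRange_one], fun i hi => ?_⟩
  rw [down0_row B R C i hi]
  simp [PySem.List.length_pyRange_one]

theorem down0_entry (B : List String) (R C : Int) (i j : Nat)
    (hi : i < R.toNat) (hj : j < C.toNat) :
    pvG (pvDown0 B R C) i j = if pvX B i (j : Int) then 1 else 0 := by
  unfold pvG
  rw [down0_row B R C i hi, PySem.List.pyRange_zero C, List.map_map, List.getD_eq_getElem?_getD]
  simp [List.getElem?_range, hj, pvX]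

theorem inner_aux (R C : Int) (iN : Nat) (h1 : 1 ≤ iN) (hiR : iN < R.toNat) :
    ∀ (k aN : Nat) (d : List (List Int)), C.toNat - aN = k → pvShape d R C →
      pvShape ((PySem.List.pyRange (aN : Int) C 1).foldl (fun d j =>
          PySem.List.pySetD d (iN : Int)
            (PySem.List.pySetD (PySem.List.pyGetD d (iN : Int) []) j
              (pvDget d (iN : Int) j + pvDget d ((iN : Int) - 1) j))) d) R C ∧
      (∀ i' j : Nat, i' ≠ iN →
        pvG ((PySem.List.pyRange (aN : Int) C 1).foldl (fun d j =>
          PySem.List.pySetD d (iN : Int)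
            (PySem.List.pySetD (PySem.List.pyGetD d (iN : Int) []) j
              (pvDget d (iN : Int) j + pvDget d ((iN : Int) - 1) j))) d) i' j = pvG d i' j) ∧
      (∀ j : Nat,
        pvG ((PySem.List.pyRange (aN : Int) C 1).foldl (fun d j =>
          PySem.List.pySetD d (iN : Int)
            (PySem.List.pySetD (PySem.List.pyGetD d (iN : Int) []) j
              (pvDget d (iN : Int) j + pvDget d ((iN : Int) - 1) j))) d) iN j =
          if aN ≤ j ∧ j < C.toNat then pvG d iN j + pvG d (iN - 1) j else pvG d iN j) := by
  intro k
  induction k with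
  | zero =>
    intro aN d hk hsh
    have hCa : C ≤ (aN : Int) := by omega
    rw [PySem.List.pyRange_one_eq_nil hCa]
    refine ⟨hsh, fun _ _ _ => rfl, fun j => ?_⟩
    rw [if_neg (by omega : ¬ (aN ≤ j ∧ j < C.toNat))]
    rfl
  | succ k ih =>
    intro aN d hk hsh
    have haC : (aN : Int) < C := by omega
    rw [PySem.List.pyRange_one_cons haC]
    simp only [List.foldl_cons]
    -- the one step at column aN
    have hrowlen : (d.getD iN []).length = C.toNat := hsh.2 iN hiR
    have hdl : d.length = R.toNat := hsh.1
    have hstep :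
        PySem.List.pySetD d (iN : Int)
            (PySem.List.pySetD (PySem.List.pyGetD d (iN : Int) []) (aN : Int)
              (pvDget d (iN : Int) (aN : Int) + pvDget d ((iN : Int) - 1) (aN : Int))) =
        d.set iN ((d.getD iN []).set aN (pvG d iN aN + pvG d (iN - 1) aN)) := by
      have hcast : ((iN : Int) - 1) = ((iN - 1 : Nat) : Int) := by omega
      rw [hcast, pvDget_natCast, pvDget_natCast,
        PySem.List.pyGetD_natCast, PySem.List.pySetD_of_nonneg _ _ (by positivity),
        PySem.List.pySetD_of_nonneg _ _ (by positivity)]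
      simp
    rw [hstep]
    set d' := d.set iN ((d.getD iN []).set aN (pvG d iN aN + pvG d (iN - 1) aN)) with hd'
    have hsh' : pvShape d' R C := by
      refine ⟨by simp [hd', hdl], fun i hi => ?_⟩
      rcases eq_or_ne i iN with rfl|hne
      · rw [hd', List.getD_eq_getElem?_getD, List.getElem?_set_self (by omega)]
        simpa using hrowlen
      · rw [hd', List.getD_eq_getElem?_getD, List.getElem?_set_ne (by omega)]
        rw [← List.getD_eq_getElem?_getD]
        exact hsh.2 i hi
    have hG' : ∀ i' j : Nat, i' ≠ iN → pvG d' i' j = pvG d i' j := by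
      intro i' j hne
      rw [hd', pvG_set]
      simp [hne]
    have hGiN : ∀ j : Nat, pvG d' iN j =
        if j = aN then pvG d iN aN + pvG d (iN - 1) aN else pvG d iN j := by
      intro j
      rw [hd', pvG_set]
      simp only [hdl, hiR, and_true, if_true]
      rcases eq_or_ne j aN with rfl|hne
      · rw [List.getD_eq_getElem?_getD, List.getElem?_set_self (by omega)]
        simp
      · rw [List.getD_eq_getElem?_getD, List.getElem?_set_ne (by omega),
          ← List.getD_eq_getElem?_getD]
        simp [hne, pvG]
    have hcast1 : ((aN : Int) + 1) = ((aN + 1 : Nat) : Int) := by omega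
    rw [hcast1]
    obtain ⟨rsh, rne, riN⟩ := ih (aN + 1) d' (by omega) hsh'
    refine ⟨rsh, fun i' j hne => by rw [rne i' j hne, hG' i' j hne], fun j => ?_⟩
    rw [riN j]
    rcases eq_or_ne j aN with hj|hne
    · subst hj
      rw [if_neg (by omega : ¬ (j + 1 ≤ j ∧ j < C.toNat)), hGiN, if_pos rfl,
        if_pos (by omega : j ≤ j ∧ j < C.toNat)]
    · rw [hGiN, if_neg hne, hG' (iN - 1) j (by omega)]
      by_cases h : aN + 1 ≤ j ∧ j < C.toNat
      · rw [if_pos h, if_pos (by omega : aN ≤ j ∧ j < C.toNat)]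
      · rw [if_neg h, if_neg (by omega : ¬ (aN ≤ j ∧ j < C.toNat))]

theorem pvN_succ (B : List String) (j : Int) (m : Nat) :
    pvN B j (m + 1) = pvN B j m + (if pvX B m j then 1 else 0) := by
  unfold pvN
  rw [List.range_succ, List.countP_append]
  rcases h : pvX B m j <;> simp [h, List.countP_cons]

theorem down_spec (B : List String) (R C : Int) :
    ∀ m : Nat, 1 ≤ m → m ≤ R.toNat →
      pvShape ((PySem.List.pyRange 1 (m : Int) 1).foldl (pvInnerStep C) (pvDown0 B R C)) R C ∧
      ∀ i j : Nat, i < R.toNat → j < C.toNat →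
        pvG ((PySem.List.pyRange 1 (m : Int) 1).foldl (pvInnerStep C) (pvDown0 B R C)) i j =
          if i < m then (pvN B (j : Int) (i + 1) : Int) else (if pvX B i (j : Int) then 1 else 0) := by
  intro m
  induction m with
  | zero => omega
  | succ m ih =>
    intro _ hm1
    rcases Nat.eq_zero_or_pos m with rfl|hm
    · -- m + 1 = 1 : empty outer range, table is down0
      rw [(by norm_num : ((0 + 1 : Nat) : Int) = 1), PySem.List.pyRange_one_eq_nil le_rfl]
      refine ⟨down0_shape B R C, fun i j hi hj => ?_⟩
      simp only [List.foldl_nil]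
      rw [down0_entry B R C i j hi hj]
      rcases Nat.eq_zero_or_pos i with rfl|hi0
      · rw [if_pos (by omega : 0 < 0 + 1)]
        have h1 : pvN B (j : Int) 1 = (List.range 1).countP (fun i => pvX B i (j : Int)) := rfl
        rw [h1, List.range_one]
        rcases h : pvX B 0 (j : Int) <;> simp [h, List.countP_cons]
      · rw [if_neg (by omega : ¬ i < 0 + 1)]
    · -- step: peel the last outer iteration
      have hcast : ((m + 1 : Nat) : Int) = (m : Int) + 1 := by omega
      rw [hcast, PySem.List.pyRange_one_succ_right (by omega : (1 : Int) ≤ (m : Int)),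
        List.foldl_append]
      obtain ⟨sh, ent⟩ := ih hm (by omega)
      set D := (PySem.List.pyRange 1 (m : Int) 1).foldl (pvInnerStep C) (pvDown0 B R C) with hD
      simp only [List.foldl_cons, List.foldl_nil]
      have hstep : pvInnerStep C D (m : Int) =
          (PySem.List.pyRange ((0 : Nat) : Int) C 1).foldl (fun d j =>
            PySem.List.pySetD d (m : Int)
              (PySem.List.pySetD (PySem.List.pyGetD d (m : Int) []) j
                (pvDget d (m : Int) j + pvDget d ((m : Int) - 1) j))) D := by
        simp [pvInnerStep]
      rw [hstep]
      obtain ⟨rsh, rne, riN⟩ := inner_aux R C m hm (by omega) C.toNat 0 D (by omega) sh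
      refine ⟨rsh, fun i j hi hj => ?_⟩
      rcases eq_or_ne i m with rfl|hne
      · rw [riN j, if_pos (⟨Nat.zero_le _, hj⟩ : 0 ≤ j ∧ j < C.toNat)]
        have e1 : pvG D i j = if pvX B i (j : Int) then 1 else 0 := by
          rw [ent i j hi hj, if_neg (by omega : ¬ i < i)]
        have e2 : pvG D (i - 1) j = (pvN B (j : Int) i : Int) := by
          rw [ent (i - 1) j (by omega) hj, if_pos (by omega : i - 1 < i),
            (by omega : i - 1 + 1 = i)]
        rw [e1, e2, if_pos (by omega : i < i + 1)]
        have hx := pvN_succ B (j : Int) i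
        rcases h : pvX B i (j : Int) <;> simp [h] at hx ⊢ <;> omega
      · rw [rne i j hne, ent i j hi hj]
        by_cases h : i < m
        · rw [if_pos h, if_pos (by omega : i < m + 1)]
        · rw [if_neg h, if_neg (by omega : ¬ i < m + 1)]

theorem down_entry (B : List String) (R C : Int) (hR : 1 ≤ R) (i j : Nat)
    (hi : i < R.toNat) (hj : j < C.toNat) :
    pvG (pvDown B R C) i j = (pvN B (j : Int) (i + 1) : Int) := by
  have hcast : ((R.toNat : Nat) : Int) = R := by omega
  have := (down_spec B R C R.toNat (by omega) le_rfl).2 i j hi hj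
  rw [hcast] at this
  rw [pvDown, this, if_pos hi]

theorem pvN_mono (B : List String) (j : Int) {a b : Nat} (h : a ≤ b) :
    pvN B j a ≤ pvN B j b := by
  induction b with
  | zero =>
    have : a = 0 := by omega
    subst this
    exact le_rfl
  | succ b ih =>
    rcases Nat.lt_or_ge a (b + 1) with h1|h1
    · have := pvN_succ B j b
      rcases Nat.lt_or_ge a b with h2|h2
      · have := ih (by omega)
        rcases pvX B b j <;> simp_all <;> omega
      · have : a = b := by omega
        subst this
        rcases pvX B a j <;> simp_all
    · have : a = b + 1 := by omega
      subst this
      exact le_rfl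

theorem pvColGo_cons (B : List String) (R K j i cnt : Int) (rest : List Int) :
    pvColGo B R K j (i :: rest) cnt =
      if pvCell B i j then
        (if cnt + 1 = K then i else pvColGo B R K j rest (cnt + 1))
      else pvColGo B R K j rest cnt := rfl

theorem colGo_spec (B : List String) (R K j : Int) (hK : 1 ≤ K) :
    ∀ (k aN : Nat) (cnt : Int), R.toNat - aN = k → (aN : Int) ≤ R → cnt < K →
      (aN : Int) ≤ pvColGo B R K j (PySem.List.pyRange (aN : Int) R 1) cnt ∧
      pvColGo B R K j (PySem.List.pyRange (aN : Int) R 1) cnt ≤ R ∧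
      ∀ i : Nat, aN ≤ i → i < R.toNat →
        (pvColGo B R K j (PySem.List.pyRange (aN : Int) R 1) cnt ≤ (i : Int) ↔
          K ≤ cnt + ((pvN B j (i + 1) : Int) - (pvN B j aN : Int))) := by
  intro k
  induction k with
  | zero =>
    intro aN cnt hk haR hcnt
    rw [PySem.List.pyRange_one_eq_nil (by omega : R ≤ (aN : Int))]
    exact ⟨haR, le_rfl, fun i hi1 hi2 => by omega⟩
  | succ k ih =>
    intro aN cnt hk haR hcnt
    have haR' : (aN : Int) < R := by omega
    rw [PySem.List.pyRange_one_cons haR', pvColGo_cons,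
      (show pvCell B (aN : Int) j = pvX B aN j from rfl),
      (by omega : ((aN : Int) + 1) = ((aN + 1 : Nat) : Int))]
    have hsucc := pvN_succ B j aN
    rcases hx : pvX B aN j
    · -- no X in row aN
      rw [if_neg (by simp)]
      rw [hx] at hsucc
      rw [if_neg (by simp)] at hsucc
      obtain ⟨b1, b2, b3⟩ := ih (aN + 1) cnt (by omega) (by omega) hcnt
      refine ⟨by omega, b2, fun i hi1 hi2 => ?_⟩
      rcases Nat.eq_or_lt_of_le hi1 with rfl|hlt
      · exact ⟨fun h => by omega, fun h => by omega⟩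
      · rw [b3 i (by omega) hi2]
        constructor <;> intro <;> omega
    · -- an X in row aN
      rw [if_pos (by simp)]
      rw [hx] at hsucc
      rw [if_pos (by simp)] at hsucc
      by_cases hEq : cnt + 1 = K
      · rw [if_pos hEq]
        refine ⟨le_rfl, by omega, fun i hi1 hi2 => ?_⟩
        have hmono := pvN_mono B j (show aN + 1 ≤ i + 1 by omega)
        exact ⟨fun _ => by omega, fun _ => by omega⟩
      · rw [if_neg hEq]
        obtain ⟨b1, b2, b3⟩ := ih (aN + 1) (cnt + 1) (by omega) (by omega) (by omega)
        refine ⟨by omega, b2, fun i hi1 hi2 => ?_⟩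
        rcases Nat.eq_or_lt_of_le hi1 with rfl|hlt
        · exact ⟨fun h => by omega, fun h => by omega⟩
        · rw [b3 i (by omega) hi2]
          constructor <;> intro <;> omega

-- the per-column threshold value of column j
def pvT (B : List String) (R K j : Int) : Int :=
  pvColGo B R K j (PySem.List.pyRange 0 R 1) 0

theorem pvT_spec (B : List String) (R K j : Int) (hK : 1 ≤ K) (hR : 0 ≤ R) :
    (0 ≤ pvT B R K j ∧ pvT B R K j ≤ R) ∧
      ∀ i : Nat, i < R.toNat → (pvT B R K j ≤ (i : Int) ↔ K ≤ (pvN B j (i + 1) : Int)) := by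
  have h0 : ((0 : Nat) : Int) = 0 := rfl
  obtain ⟨b1, b2, b3⟩ := colGo_spec B R K j hK R.toNat 0 0 (by omega) (by omega) (by omega)
  rw [h0] at b1 b2 b3
  refine ⟨⟨b1, b2⟩, fun i hi => ?_⟩
  have := b3 i (by omega) hi
  have hz : pvN B j 0 = 0 := rfl
  rw [hz] at this
  rw [pvT, this]
  push_cast
  constructor <;> intro <;> omega

theorem hist_aux :
    ∀ (ts : List Int) (h : List Int), (∀ x ∈ ts, 0 ≤ x ∧ x < (h.length : Int)) →
      ∀ i : Int, 0 ≤ i →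
        PySem.List.pyGetD
          (ts.foldl (fun h tj => PySem.List.pySetD h tj (PySem.List.pyGetD h tj 0 + 1)) h) i 0 =
          PySem.List.pyGetD h i 0 + (ts.count i : Int) := by
  intro ts
  induction ts with
  | nil => intro h _ i _; simp
  | cons tj rest ih =>
    intro h hb i hi
    have htj := hb tj (by simp)
    have hcast : tj = ((tj.toNat : Nat) : Int) := by omega
    simp only [List.foldl_cons]
    have hlen : (PySem.List.pySetD h tj (PySem.List.pyGetD h tj 0 + 1)).length = h.length := by
      rw [hcast, PySem.List.pySetD_of_nonneg _ _ (by omega)]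
      simp
    rw [ih _ (by rw [hlen]; intro x hx; exact hb x (by simp [hx])) i hi]
    have hcast2 : i = ((i.toNat : Nat) : Int) := by omega
    rw [hcast, hcast2, PySem.List.pyGetD_pySetD_natCast _ _ _ _ _ (by omega)]
    rw [List.count_cons]
    rcases eq_or_ne i.toNat tj.toNat with heq|hne
    · rw [if_pos heq, heq]
      simp
      push_cast
      ring
    · rw [if_neg hne]
      simp only [beq_iff_eq]
      rw [if_neg (by omega)]
      push_cast
      ring

theorem countP_split (ts : List Int) (i : Int) :
    ts.countP (fun x => decide (x ≤ i)) =
      ts.countP (fun x => decide (x ≤ i - 1)) + ts.count i := by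
  induction ts with
  | nil => rfl
  | cons a rest ih =>
    rw [List.countP_cons, List.countP_cons, List.count_cons, ih]
    simp only [beq_iff_eq, decide_eq_true_eq]
    by_cases h1 : a = i
    · rw [if_pos h1, if_pos (by omega), if_neg (by omega)]
      omega
    · rw [if_neg h1]
      by_cases h2 : a ≤ i
      · rw [if_pos h2, if_pos (by omega)]
        omega
      · rw [if_neg h2, if_neg (by omega)]
        omega

theorem thresh_mem_bounds (B : List String) (R C K : Int) (hK : 1 ≤ K) (hR : 0 ≤ R) :
    ∀ x ∈ pvThresh B R C K, 0 ≤ x ∧ x ≤ R := by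
  intro x hx
  obtain ⟨j, _, rfl⟩ := List.mem_map.mp hx
  exact (pvT_spec B R K j hK hR).1

-- the count of the extra term and the cost of row i as B's loop computes them
def pvExtra (B : List String) (R C K i : Int) : Int :=
  ((PySem.List.pyRange 0 C 1).map (fun j =>
    if pvCell B i j && decide (i < PySem.List.pyGetD (pvThresh B R C K) j 0) then (1 : Int) else 0)).sum

def pvCostB (B : List String) (R C K i : Int) : Int :=
  i + 1 - K + ((pvThresh B R C K).countP (fun x => decide (x ≤ i)) : Int) + pvExtra B R C K i

theorem thresh_eq_map (B : List String) (R C K : Int) :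
    pvThresh B R C K = (PySem.List.pyRange 0 C 1).map (pvT B R K) := rfl

theorem cost_eq (B : List String) (R C K : Int) (hK : 1 ≤ K) (hKR : K ≤ R)
    (i : Int) (hi1 : K - 1 ≤ i) (hi2 : i < R) :
    i + 1 - K + ((PySem.List.pyRange 0 C 1).map (fun j =>
        if pvCell B i j || decide (K ≤ pvDget (pvDown B R C) i j) then (1 : Int) else 0)).sum =
      pvCostB B R C K i := by
  have h0i : 0 ≤ i := by omega
  rw [pvCostB, pvExtra, thresh_eq_map, List.countP_map, ← PySem.List.sum_map_ite_one_zero]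
  simp only [Function.comp_def]
  have hmapT : ((PySem.List.pyRange 0 C 1).map (fun j =>
      if pvCell B i j && decide (i < PySem.List.pyGetD ((PySem.List.pyRange 0 C 1).map (pvT B R K)) j 0)
      then (1 : Int) else 0)) =
      ((PySem.List.pyRange 0 C 1).map (fun j =>
        if pvCell B i j && decide (i < pvT B R K j) then (1 : Int) else 0)) := by
    apply List.map_congr_left
    intro j hj
    have hjb := (PySem.List.mem_pyRange_one).mp hj
    rw [PySem.List.pyGetD_map_pyRange_of_nonneg _ _ _ _ (by omega) (by omega)]
  rw [hmapT]
  have hsum : ((PySem.List.pyRange 0 C 1).map (fun x =>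
        if decide (pvT B R K x ≤ i) = true then (1 : Int) else 0)).sum +
      ((PySem.List.pyRange 0 C 1).map (fun j =>
        if pvCell B i j && decide (i < pvT B R K j) then (1 : Int) else 0)).sum =
      ((PySem.List.pyRange 0 C 1).map (fun j =>
        if pvCell B i j || decide (K ≤ pvDget (pvDown B R C) i j) then (1 : Int) else 0)).sum := by
    rw [← PySem.List.sum_map_add_int]
    apply congrArg
    apply List.map_congr_left
    intro j hj
    have hjb := (PySem.List.mem_pyRange_one).mp hj
    have hjc : ((j.toNat : Nat) : Int) = j := by omega
    have hic : ((i.toNat : Nat) : Int) = i := by omega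
    have hdown : pvDget (pvDown B R C) i j = (pvN B j (i.toNat + 1) : Int) := by
      rw [← hic, ← hjc, pvDget_natCast,
        down_entry B R C (by omega) i.toNat j.toNat (by omega) (by omega), hjc]
      congr 2 <;> omega
    have hiff := (pvT_spec B R K j hK (by omega)).2 i.toNat (by omega)
    rw [hic] at hiff
    rw [hdown]
    by_cases ht : pvT B R K j ≤ i
    · have hpre : K ≤ (pvN B j (i.toNat + 1) : Int) := hiff.mp ht
      rw [if_pos (by simpa using ht), if_neg (by simp; omega)]
      rcases hc : pvCell B i j
      · rw [if_pos (by simp [hc]; omega)]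
        omega
      · rw [if_pos (by simp [hc])]
        omega
    · have hpre : ¬ K ≤ (pvN B j (i.toNat + 1) : Int) := fun h => ht (hiff.mpr h)
      rw [if_neg (by simpa using ht)]
      rcases hc : pvCell B i j
      · rw [if_neg (by simp [hc]), if_neg (by simp [hc]; omega)]
        omega
      · rw [if_pos (by simp [hc]; omega), if_pos (by simp [hc])]
        omega
  rw [← hsum]
  ring_nf


-- zero entries of the freshly allocated histogram
theorem pyGetD_replicate_zero (n : Nat) (i : Int) (h0 : 0 ≤ i) :
    PySem.List.pyGetD (List.replicate n (0 : Int)) i 0 = 0 := by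
  have hc : i = ((i.toNat : Nat) : Int) := by omega
  rw [hc, PySem.List.pyGetD_natCast]
  rcases Nat.lt_or_ge i.toNat n with h|h
  · rw [List.getD_eq_getElem?_getD]
    simp [h]
  · rw [List.getD_eq_getElem?_getD, List.getElem?_eq_none (by simpa using h)]
    rfl

-- histogram entries are occurrence counts of the threshold list
theorem hist_count (R : Int) (t : List Int) (hb : ∀ x ∈ t, 0 ≤ x ∧ x ≤ R)
    (i : Int) (h0 : 0 ≤ i) :
    PySem.List.pyGetD (pvHist R t) i 0 = (t.count i : Int) := by
  rcases t with _|⟨y, ys⟩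
  · rw [pvHist]
    simp only [List.foldl_nil, List.count_nil, Nat.cast_zero]
    exact pyGetD_replicate_zero _ i h0
  · have hR : 0 ≤ R := le_trans (hb y (by simp)).1 (hb y (by simp)).2
    rw [pvHist, hist_aux _ _ ?_ i h0, pyGetD_replicate_zero _ i h0, zero_add]
    intro x hx
    have := hb x hx
    have hl : ((List.replicate (R + 1).toNat (0 : Int)).length : Int) = R + 1 := by
      simp; omega
    rw [hl]
    omega

-- the running-minimum update of B's loop
def pvUpdMin (b : Option Int) (x : Int) : Option Int :=
  match b with
  | none => some x
  | some v => if x < v then some x else some v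

theorem foldl_updMin_some (l : List Int) : ∀ x : Int,
    l.foldl pvUpdMin (some x) = some (l.foldl min x) := by
  induction l with
  | nil => intro x; rfl
  | cons y ys ih =>
    intro x
    simp only [List.foldl_cons]
    have : pvUpdMin (some x) y = some (min x y) := by
      rw [pvUpdMin, min_def]
      by_cases h : y < x
      · rw [if_pos h, if_neg (by omega)]
      · rw [if_neg h, if_pos (by omega)]
    rw [this, ih]

-- the while loop advances nxt to max nxt (i+1), summing the skipped histogram entries
theorem pvWhile_spec (hist : List Int) (i : Int) :
    ∀ (k : Nat) (base nxt : Int), (i + 1 - nxt).toNat = k →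
      pvWhile hist i base nxt =
        (base + ((PySem.List.pyRange nxt (i + 1) 1).map
          (fun x => PySem.List.pyGetD hist x 0)).sum, max nxt (i + 1)) := by
  intro k
  induction k with
  | zero =>
    intro base nxt hk
    rw [pvWhile, if_neg (by omega : ¬ nxt ≤ i),
      PySem.List.pyRange_one_eq_nil (by omega : i + 1 ≤ nxt)]
    simp only [List.map_nil, List.sum_nil, add_zero]
    rw [max_eq_left (by omega)]
  | succ k ih =>
    intro base nxt hk
    rw [pvWhile, if_pos (by omega : nxt ≤ i), ih _ _ (by omega),
      PySem.List.pyRange_one_cons (by omega : nxt < i + 1)]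
    simp only [List.map_cons, List.sum_cons]
    rw [max_eq_right (by omega : nxt + 1 ≤ i + 1), max_eq_right (by omega : nxt ≤ i + 1)]
    refine Prod.ext ?_ rfl
    simp only
    ring

-- advancing the prefix of the histogram counts the thresholds below the new bound
theorem base_adv (R : Int) (t : List Int) (hb : ∀ x ∈ t, 0 ≤ x ∧ x ≤ R) (hi : Int) :
    ∀ (k : Nat) (nxt : Int), 0 ≤ nxt → (hi - nxt).toNat = k →
      (t.countP (fun x => decide (x < nxt)) : Int) +
        ((PySem.List.pyRange nxt hi 1).map (fun x => PySem.List.pyGetD (pvHist R t) x 0)).sum =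
      (t.countP (fun x => decide (x < max nxt hi)) : Int) := by
  intro k
  induction k with
  | zero =>
    intro nxt h0 hk
    rw [PySem.List.pyRange_one_eq_nil (by omega : hi ≤ nxt), max_eq_left (by omega)]
    simp
  | succ k ih =>
    intro nxt h0 hk
    rw [PySem.List.pyRange_one_cons (by omega : nxt < hi)]
    simp only [List.map_cons, List.sum_cons]
    rw [hist_count R t hb nxt h0]
    have hstep : (t.countP (fun x => decide (x < nxt)) : Int) + (t.count nxt : Int) =
        (t.countP (fun x => decide (x < nxt + 1)) : Int) := by
      have := countP_split t nxt
      have hc : t.countP (fun x => decide (x ≤ nxt - 1)) =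
          t.countP (fun x => decide (x < nxt)) := by
        apply List.countP_congr
        intro x _
        simp only [decide_eq_true_eq]
        omega
      have hc2 : t.countP (fun x => decide (x ≤ nxt)) =
          t.countP (fun x => decide (x < nxt + 1)) := by
        apply List.countP_congr
        intro x _
        simp only [decide_eq_true_eq]
        omega
      rw [hc, hc2] at this
      omega
    rw [← add_assoc, hstep, ih (nxt + 1) (by omega) (by omega),
      max_eq_right (by omega : nxt ≤ hi), max_eq_right (by omega : nxt + 1 ≤ hi)]

theorem alt_fold (B : List String) (R C K : Int)
    (ht : ∀ x ∈ pvThresh B R C K, 0 ≤ x ∧ x ≤ R) :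
    ∀ (k : Nat) (a base nxt : Int) (b0 : Option Int), (R - a).toNat = k →
      0 ≤ nxt → nxt ≤ max a 0 →
      base = ((pvThresh B R C K).countP (fun x => decide (x < nxt)) : Int) →
      ((PySem.List.pyRange a R 1).foldl (pvStepB B R C K) (base, nxt, b0)).2.2 =
      ((PySem.List.pyRange a R 1).map (pvCostB B R C K)).foldl pvUpdMin b0 := by
  intro k
  induction k with
  | zero =>
    intro a base nxt b0 hk h0 hmax hbase
    rw [PySem.List.pyRange_one_eq_nil (by omega : R ≤ a)]
    rfl
  | succ k ih =>
    intro a base nxt b0 hk h0 hmax hbase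
    subst hbase
    rw [PySem.List.pyRange_one_cons (by omega : a < R)]
    rw [List.foldl_cons, List.map_cons]
    have hnew := base_adv R (pvThresh B R C K) ht (a + 1) (a + 1 - nxt).toNat nxt h0 rfl
    have hcost : ((pvThresh B R C K).countP (fun x => decide (x < max nxt (a + 1))) : Int) =
        ((pvThresh B R C K).countP (fun x => decide (x ≤ a)) : Int) := by
      rcases le_or_gt nxt (a + 1) with h|h
      · rw [max_eq_right h]
        congr 1
        apply List.countP_congr
        intro x _
        simp only [decide_eq_true_eq]
        omega
      · rw [max_eq_left (by omega)]
        have hn0 : nxt = 0 := by omega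
        subst hn0
        congr 1
        apply List.countP_congr
        intro x hx
        have := ht x hx
        simp only [decide_eq_true_eq]
        omega
    have hcB : a + 1 - K + ((pvThresh B R C K).countP (fun x => decide (x ≤ a)) : Int) +
        ((PySem.List.pyRange 0 C 1).map (fun j =>
          if pvCell B a j && decide (a < PySem.List.pyGetD (pvThresh B R C K) j 0)
          then (1 : Int) else 0)).sum = pvCostB B R C K a := by
      rw [pvCostB, pvExtra]
    have happ : pvStepB B R C K
        (((pvThresh B R C K).countP (fun x => decide (x < nxt)) : Int), nxt, b0) a =
        (((pvThresh B R C K).countP (fun x => decide (x < max nxt (a + 1))) : Int),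
          max nxt (a + 1), pvUpdMin b0 (pvCostB B R C K a)) := by
      rw [pvStepB]
      dsimp only
      rw [pvWhile_spec (pvHist R (pvThresh B R C K)) a (a + 1 - nxt).toNat
        (((pvThresh B R C K).countP (fun x => decide (x < nxt)) : Int)) nxt rfl]
      dsimp only
      rw [hnew]
      refine Prod.ext rfl (Prod.ext rfl ?_)
      dsimp only
      rw [hcost, hcB]
      cases b0 <;> rfl
    rw [happ, ih (a + 1) _ (max nxt (a + 1)) (pvUpdMin b0 (pvCostB B R C K a))
      (by omega) (by omega) (by omega) rfl, List.foldl_cons]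

-- ===== VERDICT (by name: the statement is the Claim_ definition above) =====
theorem push_up_spec : Claim_equal_push_up := by
  unfold Claim_equal_push_up
  intro B R C K _ hPre
  obtain ⟨hKR, hrest⟩ := hPre
  unfold Spec_push_up
  have ht : ∀ x ∈ pvThresh B R C K, 0 ≤ x ∧ x ≤ R := by
    by_cases hK1 : 1 ≤ K
    · exact thresh_mem_bounds B R C K hK1 (by omega)
    · have hC : C ≤ 0 := by
        rcases hrest with h|h
        · exact h
        · omega
      rw [pvThresh, PySem.List.pyRange_one_eq_nil hC]
      simp
  have hbase0 : (0 : Int) = ((pvThresh B R C K).countP (fun x => decide (x < 0)) : Int) := by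
    rw [List.countP_eq_zero.mpr]
    · rfl
    · intro x hx
      have := ht x hx
      simp only [decide_eq_true_eq]
      omega
  have halt := alt_fold B R C K ht (R - (K - 1)).toNat (K - 1) 0 0 none rfl le_rfl
    (by omega) hbase0
  rw [push_up, push_up_alt]
  rw [halt]
  have hmap : (PySem.List.pyRange (K - 1) R 1).map (fun i =>
      i + 1 - K + ((PySem.List.pyRange 0 C 1).map (fun j =>
        if pvCell B i j || decide (K ≤ pvDget (pvDown B R C) i j) then (1 : Int) else 0)).sum) =
      (PySem.List.pyRange (K - 1) R 1).map (pvCostB B R C K) := by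
    apply List.map_congr_left
    intro i hi
    have hib := (PySem.List.mem_pyRange_one).mp hi
    by_cases hK1 : 1 ≤ K
    · exact cost_eq B R C K hK1 hKR i hib.1 hib.2
    · have hC : C ≤ 0 := by
        rcases hrest with h|h
        · exact h
        · omega
      rw [pvCostB, pvExtra, pvThresh, PySem.List.pyRange_one_eq_nil hC]
      simp
  rw [hmap, PySem.List.pyRange_one_cons (by omega : K - 1 < R), List.map_cons,
    PySem.List.min?_id_cons, List.foldl_cons]
  have h1 : pvUpdMin none (pvCostB B R C K (K - 1)) = some (pvCostB B R C K (K - 1)) := rfl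
  rw [h1, foldl_updMin_some]
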